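-- pv_equiv track=rewrite | github.com/kahenya-anita/G-Codility | Road.py | solution
-- ===== SOURCE A (Python) =====
-- def solution(L1, L2):
--     N = len(L1)
--
--     def longest_repair(lane):
--         max_repair = 0
--         current_repair = 0
--         for segment in lane:
--             if segment == 'x':
--                 current_repair += 1
--                 max_repair = max(max_repair, current_repair)
--             else:
--                 current_repair = 0
--         return max_repair
--
--     # Find the longest repairable stretch in each lane
--     repair_L1 = longest_repair(L1)
--     repair_L2 = longest_repair(L2)
--
--     # Count total potholes
--     total_potholes = L1.count('x') + L2.count('x')
--
--     # If we can repair all potholes in one lane, do it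
--     if repair_L1 == L1.count('x') or repair_L2 == L2.count('x'):
--         return total_potholes
--
--     # Otherwise, we need to find the best non-overlapping repairs
--     best_repair = 0
--     current_repair_L1 = 0
--     current_repair_L2 = 0
--
--     for i in range(N):
--         if L1[i] == 'x':
--             current_repair_L1 += 1
--         else:
--             current_repair_L1 = 0
--
--         if L2[i] == 'x':
--             current_repair_L2 += 1
--         else:
--             current_repair_L2 = 0
--
--         best_repair = max(best_repair, current_repair_L1 + repair_L2, repair_L1 + current_repair_L2)
--
--     return min(best_repair, total_potholes)
-- ===== SOURCE B (Python) =====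
-- def solution(L1, L2):
--     # Per lane, build the list of 'x'-run lengths once, then combine in closed form:
--     # the best two-lane repair is always longest_run(L1) + longest_run(L2), so the
--     # third simultaneous scan of A is replaced by a constant-time expression.
--     def stats(lane):
--         runs = [0]
--         for seg in lane:
--             if seg == 'x':
--                 runs[-1] += 1
--             else:
--                 runs.append(0)
--         return max(runs), sum(runs)
--
--     repair1, count1 = stats(L1)
--     repair2, count2 = stats(L2)
--     total = count1 + count2
--     if repair1 == count1 or repair2 == count2:
--         return total
--     return min(repair1 + repair2, total)
-- ===== Notes on version B (the rewrite author's own statement) =====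
-- stated objective: simpler
-- what changed: B drops A's third simultaneous scan entirely (the best combined repair provably equals longest_run(L1)+longest_run(L2), computed as a constant-time expression) and derives each lane's longest run and pothole count from a run-length list built in one pass, instead of A's separate (max,current) fold plus extra .count passes.
import Mathlib
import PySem

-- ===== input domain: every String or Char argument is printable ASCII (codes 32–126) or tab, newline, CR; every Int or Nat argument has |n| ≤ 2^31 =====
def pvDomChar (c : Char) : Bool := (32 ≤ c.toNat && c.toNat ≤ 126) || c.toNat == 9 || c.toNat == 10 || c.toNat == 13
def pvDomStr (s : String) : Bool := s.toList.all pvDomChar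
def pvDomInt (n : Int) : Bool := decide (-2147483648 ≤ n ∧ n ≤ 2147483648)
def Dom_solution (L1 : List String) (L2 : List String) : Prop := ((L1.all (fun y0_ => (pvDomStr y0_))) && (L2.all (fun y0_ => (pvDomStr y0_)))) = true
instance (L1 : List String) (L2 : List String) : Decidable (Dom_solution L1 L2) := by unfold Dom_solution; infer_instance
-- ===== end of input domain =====

-- B replaces A's third simultaneous scan by the closed form min(repair1+repair2, total)
-- and computes each lane's longest run and pothole count from a run-length list (objective: simpler).

-- ===== PORT A =====
def lrStep (st : Int × Int) (seg : String) : Int × Int :=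
  if seg = "x" then (max st.1 (st.2 + 1), st.2 + 1) else (st.1, 0)

def longestRepair (lane : List String) : Int := (lane.foldl lrStep (0, 0)).1

def solution (L1 : List String) (L2 : List String) : Int :=
  let N : Int := (L1.length : Int)
  let repair1 := longestRepair L1
  let repair2 := longestRepair L2
  let total : Int := (PySem.List.count L1 "x" : Int) + (PySem.List.count L2 "x" : Int)
  if repair1 = (PySem.List.count L1 "x" : Int) ∨ repair2 = (PySem.List.count L2 "x" : Int) then
    total
  else
    -- L1[i] / L2[i]: pyGetD is exact here — inside Pre_solution every index the loop reaches is in range for both lanes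
    let res := (PySem.List.pyRange 0 N).foldl
      (fun (st : Int × Int × Int) (i : Int) =>
        let c1 : Int := if PySem.List.pyGetD L1 i "" = "x" then st.2.1 + 1 else 0
        let c2 : Int := if PySem.List.pyGetD L2 i "" = "x" then st.2.2 + 1 else 0
        (max (max st.1 (c1 + repair2)) (repair1 + c2), c1, c2)) (0, 0, 0)
    min res.1 total

-- ===== PORT B =====
def runStep (rs : List Int) (seg : String) : List Int :=
  if seg = "x" then PySem.List.pySetD rs (-1) (PySem.List.pyGetD rs (-1) 0 + 1) else rs ++ [0]

def laneRuns (lane : List String) : List Int := lane.foldl runStep [0]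

def laneStats (lane : List String) : Int × Int :=
  let rs := laneRuns lane
  -- max(rs): rs is never empty (it starts as [0]), so the .getD default is never used
  ((PySem.List.max? rs (fun y => y)).getD 0, rs.sum)

def solution_alt (L1 : List String) (L2 : List String) : Int :=
  let s1 := laneStats L1
  let s2 := laneStats L2
  let total := s1.2 + s2.2
  if s1.1 = s1.2 ∨ s2.1 = s2.2 then total
  else min (s1.1 + s2.1) total

-- ===== PRECONDITION & SPEC =====
-- the 'x' entries of l form one contiguous block (possibly empty)
def ContigX (l : List String) : Prop :=
  "x" ∉ (l.dropWhile (fun s => s != "x")).dropWhile (fun s => s == "x")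

-- Pre_ excludes exactly the inputs on which A raises IndexError: L2 shorter than L1 while
-- neither lane's potholes are contiguous (so A's early return does not fire and its final
-- loop indexes L2 out of range); on every other input A returns normally.
def Pre_solution (L1 : List String) (L2 : List String) : Prop :=
  L1.length ≤ L2.length ∨ ContigX L1 ∨ ContigX L2

instance (L1 : List String) (L2 : List String) : Decidable (Pre_solution L1 L2) := by
  unfold Pre_solution ContigX; infer_instance

def pvWitness_solution : List String × List String := (["x", "x", "."], ["x", ".", "."])

def Spec_solution (L1 : List String) (L2 : List String) (out : Int) : Prop := out = solution_alt L1 L2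
instance (L1 : List String) (L2 : List String) (out : Int) : Decidable (Spec_solution L1 L2 out) := by unfold Spec_solution; infer_instance

-- ===== CLAIM (what is proved, stated in full; the proofs are below) =====
def Claim_equal_solution : Prop := ∀ (L1 : List String) (L2 : List String), Dom_solution L1 L2 → Pre_solution L1 L2 → Spec_solution L1 L2 (solution L1 L2)

-- ===== LEMMAS AND PROOFS =====

-- Python max(rs) on a nonempty list, as B's port writes it
def bMax (rs : List Int) : Int := (PySem.List.max? rs (fun y => y)).getD 0

-- the body of A's final loop, named for the proofs (definitionally the port's lambda)
def loopStep (L1 L2 : List String) (r1 r2 : Int) (st : Int × Int × Int) (i : Int) :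
    Int × Int × Int :=
  let c1 : Int := if PySem.List.pyGetD L1 i "" = "x" then st.2.1 + 1 else 0
  let c2 : Int := if PySem.List.pyGetD L2 i "" = "x" then st.2.2 + 1 else 0
  (max (max st.1 (c1 + r2)) (r1 + c2), c1, c2)

theorem bMax_append (u : List Int) (a : Int) (h : u ≠ []) :
    bMax (u ++ [a]) = max (bMax u) a := by
  rcases u with _ | ⟨x, t⟩
  · exact absurd rfl h
  · unfold bMax
    rw [List.cons_append, PySem.List.max?_id_cons, PySem.List.max?_id_cons]
    simp [List.foldl_append]

theorem bMax_singleton (c : Int) : bMax [c] = c := by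
  simp [bMax, PySem.List.max?_id_cons]

-- runs[-1] += 1 on a nonempty list sets its last element
theorem setLast (u : List Int) (c v : Int) :
    PySem.List.pySetD (u ++ [c]) (-1) v = u ++ [v] := by
  simp [PySem.List.pySetD, PySem.List.pySet?, PySem.List.pyIdx?]

theorem lrStep_x (st : Int × Int) : lrStep st "x" = (max st.1 (st.2 + 1), st.2 + 1) := by
  simp [lrStep]

theorem lrStep_nx (st : Int × Int) (s : String) (hs : ¬ s = "x") : lrStep st s = (st.1, 0) := by
  simp [lrStep, hs]

theorem lrStep_snd (st : Int × Int) (seg : String) :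
    (lrStep st seg).2 = if seg = "x" then st.2 + 1 else 0 := by
  unfold lrStep
  split <;> rfl

theorem runStep_x (u : List Int) (c : Int) : runStep (u ++ [c]) "x" = u ++ [c + 1] := by
  simp [runStep, PySem.List.pyGetD_neg_one_append_singleton, setLast]

theorem runStep_nx (rs : List Int) (s : String) (hs : ¬ s = "x") : runStep rs s = rs ++ [0] := by
  simp [runStep, hs]

-- state invariant of A's per-lane fold: 0 ≤ current ≤ longest ≤ count, and longest only grows
theorem lrState (lane : List String) (m c : Int) (hc : 0 ≤ c) (hcm : c ≤ m) :
    0 ≤ (lane.foldl lrStep (m, c)).2 ∧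
    (lane.foldl lrStep (m, c)).2 ≤ (lane.foldl lrStep (m, c)).1 ∧
    m ≤ (lane.foldl lrStep (m, c)).1 ∧
    (lane.foldl lrStep (m, c)).1 ≤ m + (lane.count "x" : Int) := by
  induction lane generalizing m c with
  | nil => simp; omega
  | cons s t ih =>
    simp only [List.foldl_cons, lrStep]
    by_cases hs : s = "x"
    · subst hs
      rw [if_pos rfl]
      have := ih (max m (c + 1)) (c + 1) (by omega) (by omega)
      have hcnt : ((("x" : String) :: t).count "x" : Int) = (t.count "x" : Int) + 1 := by
        simp
      refine ⟨this.1, this.2.1, by omega, ?_⟩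
      have h4 := this.2.2.2
      omega
    · rw [if_neg hs]
      have := ih m 0 le_rfl (by omega)
      have hcnt : ((s :: t).count "x" : Int) = (t.count "x" : Int) := by
        simp [hs]
      refine ⟨this.1, this.2.1, this.2.2.1, by omega⟩

-- B's run-length list against A's fold: last = current run, sum = count, max = longest
theorem runs_spec (lane : List String) :
    ∃ u, laneRuns lane = u ++ [(lane.foldl lrStep (0, 0)).2] ∧
      (laneRuns lane).sum = (PySem.List.count lane "x" : Int) ∧
      bMax (laneRuns lane) = (lane.foldl lrStep (0, 0)).1 := by
  induction lane using List.reverseRecOn with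
  | nil =>
    refine ⟨[], by simp [laneRuns], by simp [laneRuns, PySem.List.count], ?_⟩
    simp only [laneRuns, List.foldl_nil, bMax_singleton]
  | append_singleton t s ih =>
    rcases ih with ⟨u, hu, hsum, hmax⟩
    have hrw : laneRuns (t ++ [s]) = runStep (laneRuns t) s := by
      simp [laneRuns, List.foldl_append]
    have hfl : (t ++ [s]).foldl lrStep (0, 0) = lrStep (t.foldl lrStep (0, 0)) s := by
      simp [List.foldl_append]
    set st := t.foldl lrStep (0, 0) with hst
    have hstate := lrState t 0 0 le_rfl le_rfl
    rw [← hst] at hstate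
    rw [hu] at hsum hmax
    simp only [List.sum_append, List.sum_cons, List.sum_nil] at hsum
    rw [PySem.List.count_eq] at hsum
    by_cases hs : s = "x"
    · subst hs
      have hcount : (PySem.List.count (t ++ ["x"]) "x" : Int) = (List.count "x" t : Int) + 1 := by
        rw [PySem.List.count_eq]; simp [List.count_append]
      refine ⟨u, ?_, ?_, ?_⟩
      · rw [hrw, hu, hfl, runStep_x, lrStep_x]
      · rw [hrw, hu, runStep_x, hcount]
        simp only [List.sum_append, List.sum_cons, List.sum_nil]
        omega
      · rw [hrw, hu, hfl, runStep_x, lrStep_x]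
        rcases u with _ | ⟨y, v⟩
        · rw [List.nil_append] at hmax ⊢
          rw [bMax_singleton] at hmax ⊢
          omega
        · rw [bMax_append _ _ (by simp)] at hmax ⊢
          omega
    · have hcount : (PySem.List.count (t ++ [s]) "x" : Int) = (List.count "x" t : Int) := by
        rw [PySem.List.count_eq]; simp [List.count_append, hs]
      refine ⟨u ++ [st.2], ?_, ?_, ?_⟩
      · rw [hrw, hu, hfl, runStep_nx _ _ hs, lrStep_nx _ _ hs]
      · rw [hrw, hu, runStep_nx _ _ hs, hcount]
        simp only [List.sum_append, List.sum_cons, List.sum_nil]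
        omega
      · rw [hrw, hu, hfl, runStep_nx _ _ hs, lrStep_nx _ _ hs]
        rw [bMax_append _ _ (by simp)]
        rw [hmax]
        have h0m : (0:Int) ≤ st.1 := le_trans hstate.1 hstate.2.1
        omega

theorem noX_fold (p : List String) (hp : ∀ s ∈ p, ¬ s = "x") (st : Int × Int) :
    (p.foldl lrStep st).1 = st.1 := by
  induction p generalizing st with
  | nil => rfl
  | cons s t ih =>
    simp only [List.foldl_cons, lrStep, if_neg (hp s (by simp))]
    exact ih (fun a ha => hp a (by simp [ha])) _

theorem noX_fold0 (p : List String) (hp : ∀ s ∈ p, ¬ s = "x") (m : Int) :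
    p.foldl lrStep (m, 0) = (m, 0) := by
  induction p with
  | nil => rfl
  | cons s t ih =>
    simp only [List.foldl_cons, lrStep, if_neg (hp s (by simp))]
    exact ih (fun a ha => hp a (by simp [ha]))

theorem allX_fold (m : List String) (hm : ∀ s ∈ m, s = "x") (mm c : Int) (hc : 0 ≤ c)
    (hcm : c ≤ mm) :
    m.foldl lrStep (mm, c) = (max mm (c + m.length), c + m.length) := by
  induction m generalizing mm c with
  | nil => simp [max_eq_left hcm]
  | cons s t ih =>
    simp only [List.foldl_cons, lrStep, if_pos (hm s (by simp))]
    rw [ih (fun a ha => hm a (by simp [ha])) _ _ (by omega) (le_max_right _ _)]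
    have h1 : c + 1 + (t.length : Int) = c + ((t.length : Int) + 1) := by omega
    refine Prod.ext ?_ ?_
    · rw [max_assoc, max_eq_right (by omega : c + 1 ≤ c + 1 + (t.length : Int))]
      simp only [List.length_cons]
      push_cast
      rw [h1]
    · simp only [List.length_cons]
      push_cast
      rw [h1]

-- contiguous potholes ⇒ A's early-return condition holds for that lane
theorem contig_imp_special (l : List String) (h : ContigX l) :
    longestRepair l = (PySem.List.count l "x" : Int) := by
  have hdec1 : l = l.takeWhile (fun s => s != "x") ++ l.dropWhile (fun s => s != "x") :=
    (List.takeWhile_append_dropWhile).symm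
  set p := l.takeWhile (fun s => s != "x") with hpdef
  set q := l.dropWhile (fun s => s != "x") with hqdef
  have hdec2 : q = q.takeWhile (fun s => s == "x") ++ q.dropWhile (fun s => s == "x") :=
    (List.takeWhile_append_dropWhile).symm
  set m := q.takeWhile (fun s => s == "x") with hmdef
  set r := q.dropWhile (fun s => s == "x") with hrdef
  have hp : ∀ s ∈ p, ¬ s = "x" := by
    intro s hs
    have := List.mem_takeWhile_imp hs
    simpa using this
  have hm : ∀ s ∈ m, s = "x" := by
    intro s hs
    have := List.mem_takeWhile_imp hs
    simpa using this
  have hr : ∀ s ∈ r, ¬ s = "x" := by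
    intro s hs hsx
    rw [hsx] at hs
    exact h hs
  have hcountp : List.count "x" p = 0 := List.count_eq_zero.mpr (fun hx => hp _ hx rfl)
  have hcountm : List.count "x" m = m.length := List.count_eq_length.mpr (fun b hb => (hm b hb).symm)
  have hcountr : List.count "x" r = 0 := List.count_eq_zero.mpr (fun hx => hr _ hx rfl)
  have hcnt : (PySem.List.count l "x" : Int) = (m.length : Int) := by
    rw [PySem.List.count_eq]
    conv_lhs => rw [hdec1, hdec2]
    simp [List.count_append, hcountp, hcountm, hcountr]
  have hfold : longestRepair l = (m.length : Int) := by
    unfold longestRepair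
    conv_lhs => rw [hdec1, hdec2]
    rw [← List.append_assoc, List.foldl_append, List.foldl_append]
    rw [noX_fold0 p hp 0, allX_fold m hm 0 0 le_rfl le_rfl, noX_fold r hr]
    simp
  rw [hfold, hcnt]

theorem lr_mono (t : List String) (st : Int × Int) : st.1 ≤ (t.foldl lrStep st).1 := by
  induction t generalizing st with
  | nil => exact le_rfl
  | cons s r ih =>
    refine le_trans ?_ (ih (lrStep st s))
    unfold lrStep
    split
    · exact le_max_left _ _
    · exact le_rfl

theorem prefix_le (lane : List String) (n : Nat) :
    ((lane.take n).foldl lrStep (0, 0)).1 ≤ (lane.foldl lrStep (0, 0)).1 := by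
  conv_rhs => rw [← List.take_append_drop n lane]
  rw [List.foldl_append]
  exact lr_mono _ _

-- the longest run is the current run of some nonempty prefix
theorem run_attained (lane : List String) (h : lane ≠ []) :
    ∃ n : Nat, 1 ≤ n ∧ n ≤ lane.length ∧
      ((lane.take n).foldl lrStep (0, 0)).2 = (lane.foldl lrStep (0, 0)).1 := by
  induction lane using List.reverseRecOn with
  | nil => exact absurd rfl h
  | append_singleton t s ih =>
    have hfl : (t ++ [s]).foldl lrStep (0, 0) = lrStep (t.foldl lrStep (0, 0)) s := by
      simp [List.foldl_append]
    set st := t.foldl lrStep (0, 0) with hst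
    by_cases hs : s = "x"
    · by_cases hbig : st.1 ≤ st.2 + 1
      · refine ⟨t.length + 1, by omega, by simp, ?_⟩
        rw [List.take_of_length_le (by simp), hfl]
        subst hs
        rw [lrStep_x, max_eq_right hbig]
      · have ht : t ≠ [] := by
          intro he
          apply hbig
          rw [hst, he]
          decide
        rcases ih ht with ⟨n, hn1, hn2, hn3⟩
        refine ⟨n, hn1, by simp; omega, ?_⟩
        rw [List.take_append_of_le_length hn2, hfl]
        subst hs
        rw [lrStep_x, max_eq_left (by omega)]
        exact hn3
    · rcases List.eq_nil_or_concat' t with he | hcc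
      · subst he
        refine ⟨1, le_rfl, by simp, ?_⟩
        simp [lrStep, hs]
      · have ht : t ≠ [] := by rcases hcc with ⟨L, b, rfl⟩; simp
        rcases ih ht with ⟨n, hn1, hn2, hn3⟩
        refine ⟨n, hn1, by simp; omega, ?_⟩
        rw [List.take_append_of_le_length hn2, hfl]
        have : lrStep st s = (st.1, 0) := by simp [lrStep, hs]
        rw [this]
        exact hn3

theorem take_succ_concat {α : Type} (l : List α) (n : Nat) (hn : n < l.length) :
    l.take (n + 1) = l.take n ++ [l[n]] := by
  rw [List.take_add_one, List.getElem?_eq_getElem hn]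
  rfl

theorem fold_take_succ (lane : List String) (n : Nat) (hn : n < lane.length) :
    (lane.take (n + 1)).foldl lrStep (0, 0)
      = lrStep ((lane.take n).foldl lrStep (0, 0)) lane[n] := by
  rw [take_succ_concat lane n hn, List.foldl_append]
  rfl

-- invariant of A's final loop: the running currents are those of the prefixes, and the
-- best value is bounded above by repair1 + repair2 and below by every step's contribution
theorem loop_inv (L1 L2 : List String) (hlen : L1.length ≤ L2.length)
    (n : Nat) (hn : n ≤ L1.length) :
    ((PySem.List.pyRange 0 (n : Int)).foldl
        (loopStep L1 L2 (longestRepair L1) (longestRepair L2)) (0, 0, 0)).2.1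
        = ((L1.take n).foldl lrStep (0, 0)).2 ∧
    ((PySem.List.pyRange 0 (n : Int)).foldl
        (loopStep L1 L2 (longestRepair L1) (longestRepair L2)) (0, 0, 0)).2.2
        = ((L2.take n).foldl lrStep (0, 0)).2 ∧
    ((PySem.List.pyRange 0 (n : Int)).foldl
        (loopStep L1 L2 (longestRepair L1) (longestRepair L2)) (0, 0, 0)).1
        ≤ longestRepair L1 + longestRepair L2 ∧
    (∀ k : Nat, 1 ≤ k → k ≤ n →
      ((L1.take k).foldl lrStep (0, 0)).2 + longestRepair L2
        ≤ ((PySem.List.pyRange 0 (n : Int)).foldl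
            (loopStep L1 L2 (longestRepair L1) (longestRepair L2)) (0, 0, 0)).1) := by
  induction n with
  | zero =>
    have h1 := lrState L1 0 0 le_rfl le_rfl
    have h2 := lrState L2 0 0 le_rfl le_rfl
    refine ⟨by simp [PySem.List.pyRange], by simp [PySem.List.pyRange], ?_, ?_⟩
    · simp only [PySem.List.pyRange]
      norm_num
      unfold longestRepair
      omega
    · intro k hk1 hk2
      omega
  | succ n ih =>
    have hn' : n ≤ L1.length := by omega
    have hnl1 : n < L1.length := by omega
    have hnl2 : n < L2.length := by omega
    rcases ih hn' with ⟨ih1, ih2, ih3, ih4⟩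
    have hrange : PySem.List.pyRange 0 ((n + 1 : Nat) : Int)
        = PySem.List.pyRange 0 (n : Int) ++ [(n : Int)] := by
      push_cast
      exact PySem.List.pyRange_one_succ_right (by positivity)
    rw [hrange, List.foldl_append]
    simp only [List.foldl_cons, List.foldl_nil]
    set G := (PySem.List.pyRange 0 (n : Int)).foldl
        (loopStep L1 L2 (longestRepair L1) (longestRepair L2)) (0, 0, 0) with hG
    have hget1 : PySem.List.pyGetD L1 (n : Int) "" = L1[n] := by
      rw [PySem.List.pyGetD_natCast, List.getD_eq_getElem _ _ hnl1]
    have hget2 : PySem.List.pyGetD L2 (n : Int) "" = L2[n] := by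
      rw [PySem.List.pyGetD_natCast, List.getD_eq_getElem _ _ hnl2]
    have hstep : loopStep L1 L2 (longestRepair L1) (longestRepair L2) G (n : Int)
        = (max (max G.1 ((if L1[n] = "x" then G.2.1 + 1 else 0) + longestRepair L2))
               (longestRepair L1 + (if L2[n] = "x" then G.2.2 + 1 else 0)),
           (if L1[n] = "x" then G.2.1 + 1 else 0),
           (if L2[n] = "x" then G.2.2 + 1 else 0)) := by
      unfold loopStep
      rw [hget1, hget2]
    rw [hstep]
    have hc1 : (if L1[n] = "x" then G.2.1 + 1 else 0) = ((L1.take (n+1)).foldl lrStep (0, 0)).2 := by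
      rw [fold_take_succ L1 n hnl1, lrStep_snd, ih1]
    have hc2 : (if L2[n] = "x" then G.2.2 + 1 else 0) = ((L2.take (n+1)).foldl lrStep (0, 0)).2 := by
      rw [fold_take_succ L2 n hnl2, lrStep_snd, ih2]
    have hb1 : ((L1.take (n+1)).foldl lrStep (0, 0)).2 ≤ longestRepair L1 := by
      have h := lrState (L1.take (n+1)) 0 0 le_rfl le_rfl
      have := prefix_le L1 (n+1)
      unfold longestRepair
      omega
    have hb2 : ((L2.take (n+1)).foldl lrStep (0, 0)).2 ≤ longestRepair L2 := by
      have h := lrState (L2.take (n+1)) 0 0 le_rfl le_rfl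
      have := prefix_le L2 (n+1)
      unfold longestRepair
      omega
    refine ⟨by rw [hc1], by rw [hc2], ?_, ?_⟩
    · rw [hc1, hc2]
      omega
    · intro k hk1 hk2
      rcases Nat.lt_or_ge k (n + 1) with hk | hk
      · have := ih4 k hk1 (by omega)
        omega
      · have hkn : k = n + 1 := by omega
        subst hkn
        rw [hc1]
        omega

-- ===== VERDICT (by name: the statement is the Claim_ definition above) =====
theorem solution_spec : Claim_equal_solution := by
  unfold Claim_equal_solution Spec_solution
  intro L1 L2 _ hpre
  rcases runs_spec L1 with ⟨u1, hu1, hsum1, hmax1⟩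
  rcases runs_spec L2 with ⟨u2, hu2, hsum2, hmax2⟩
  have hb1 : (PySem.List.max? (laneRuns L1) (fun y => y)).getD 0 = longestRepair L1 := hmax1
  have hb2 : (PySem.List.max? (laneRuns L2) (fun y => y)).getD 0 = longestRepair L2 := hmax2
  simp only [solution, solution_alt, laneStats]
  rw [hb1, hb2, hsum1, hsum2]
  split_ifs with h
  · rfl
  · -- the early return does not fire: both lanes have non-contiguous potholes
    push Not at h
    have hnc1 : ¬ ContigX L1 := fun hc => h.1 (contig_imp_special L1 hc)
    have hnc2 : ¬ ContigX L2 := fun hc => h.2 (contig_imp_special L2 hc)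
    have hlen : L1.length ≤ L2.length := by
      rcases hpre with hl | hc | hc
      · exact hl
      · exact absurd hc hnc1
      · exact absurd hc hnc2
    have hne : L1 ≠ [] := by
      intro he
      subst he
      exact h.1 (by decide)
    have hfun : (fun (st : Int × Int × Int) (i : Int) =>
        let c1 : Int := if PySem.List.pyGetD L1 i "" = "x" then st.2.1 + 1 else 0
        let c2 : Int := if PySem.List.pyGetD L2 i "" = "x" then st.2.2 + 1 else 0
        (max (max st.1 (c1 + longestRepair L2)) (longestRepair L1 + c2), c1, c2))
        = loopStep L1 L2 (longestRepair L1) (longestRepair L2) := rfl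
    rw [hfun]
    rcases loop_inv L1 L2 hlen L1.length le_rfl with ⟨_, _, hup, hlow⟩
    rcases run_attained L1 hne with ⟨n0, hn01, hn02, hn03⟩
    have hge := hlow n0 hn01 hn02
    rw [hn03] at hge
    have hres : ((PySem.List.pyRange 0 (L1.length : Int)).foldl
        (loopStep L1 L2 (longestRepair L1) (longestRepair L2)) (0, 0, 0)).1
        = longestRepair L1 + longestRepair L2 := le_antisymm hup hge
    rw [hres]
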